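-- pv_equiv track=rewrite | github.com/nikytz/esercizi_python | es1_ok.py | partita_con_piu_gol
-- ===== SOURCE A (Python) =====
-- def partita_con_piu_gol(tupla_partite):
--     max=0
--     somma=0
--     risultati=[]
--     for squadra1, squadra2, num1, num2 in tupla_partite:
--         somma+=num1
--         somma+=num2
--         if somma>max:
--             max=somma
--             risultati.append(max)
--     return max, risultati
-- ===== SOURCE B (Python) =====
-- def partita_con_piu_gol(tupla_partite):
--     # pass 1: cumulative goal totals
--     pref = []
--     s = 0
--     for _, _, n1, n2 in tupla_partite:
--         s = s + (n1 + n2)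
--         pref.append(s)
--     # pass 2: strictly-increasing positive records; the current record is the
--     # last element of the output (0 when empty)
--     risultati = []
--     for p in pref:
--         if p > (risultati[-1] if risultati else 0):
--             risultati.append(p)
--     massimo = risultati[-1] if risultati else 0
--     return massimo, risultati
-- ===== Notes on version B (the rewrite author's own statement) =====
-- stated objective: alternative
-- what changed: B first materialises the list of cumulative goal sums in one pass, then extracts the strictly increasing records from that list in a second pass, reading the current record (and the final maximum) off the end of the output list instead of maintaining A's fused max/somma state in a single loop.
import Mathlib
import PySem

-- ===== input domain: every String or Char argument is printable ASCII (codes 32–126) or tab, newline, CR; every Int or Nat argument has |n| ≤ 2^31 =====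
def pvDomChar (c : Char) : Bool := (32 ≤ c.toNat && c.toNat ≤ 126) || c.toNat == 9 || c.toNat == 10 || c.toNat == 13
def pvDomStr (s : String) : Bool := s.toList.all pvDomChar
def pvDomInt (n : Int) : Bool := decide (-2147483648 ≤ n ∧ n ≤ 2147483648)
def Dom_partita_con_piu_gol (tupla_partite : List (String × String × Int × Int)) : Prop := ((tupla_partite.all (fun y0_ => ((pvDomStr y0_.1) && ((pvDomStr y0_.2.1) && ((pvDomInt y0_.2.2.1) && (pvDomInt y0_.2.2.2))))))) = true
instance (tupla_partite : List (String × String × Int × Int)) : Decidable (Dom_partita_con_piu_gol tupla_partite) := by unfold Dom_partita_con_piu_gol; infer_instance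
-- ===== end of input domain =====

-- B materialises the cumulative-sum list first and then collects the strictly increasing
-- records in a second pass, reading the record off the end of the output list (alternative decomposition).


-- ===== PORT A =====
-- state (max, somma, risultati), exactly A's loop
def partita_con_piu_gol (tupla_partite : List (String × String × Int × Int)) : Int × List Int :=
  let st := tupla_partite.foldl
    (fun (st : Int × Int × List Int) t =>
      let mx := st.1
      let somma := st.2.1 + t.2.2.1 + t.2.2.2
      if somma > mx then (somma, somma, st.2.2 ++ [somma]) else (mx, somma, st.2.2))
    (0, 0, [])
  (st.1, st.2.2)

-- ===== PORT B =====
-- pass 1 of Source B: cumulative goal totals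
def pvPrefB (tupla_partite : List (String × String × Int × Int)) : List Int :=
  (tupla_partite.foldl
    (fun (st : Int × List Int) t =>
      let s := st.1 + (t.2.2.1 + t.2.2.2)
      (s, st.2 ++ [s]))
    (0, [])).2

def partita_con_piu_gol_alt (tupla_partite : List (String × String × Int × Int)) : Int × List Int :=
  let pref := pvPrefB tupla_partite
  -- pass 2 of Source B: strictly-increasing positive records, record read off the end
  let risultati := pref.foldl
    (fun (ris : List Int) p => if p > (ris.getLast?.getD 0) then ris ++ [p] else ris) []
  (risultati.getLast?.getD 0, risultati)

-- ===== PRECONDITION & SPEC =====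
def Spec_partita_con_piu_gol (tupla_partite : List (String × String × Int × Int)) (out : Int × List Int) : Prop := out = partita_con_piu_gol_alt tupla_partite
instance (tupla_partite : List (String × String × Int × Int)) (out : Int × List Int) : Decidable (Spec_partita_con_piu_gol tupla_partite out) := by unfold Spec_partita_con_piu_gol; infer_instance

-- ===== CLAIM (what is proved, stated in full; the proofs are below) =====
def Claim_equal_partita_con_piu_gol : Prop := ∀ (tupla_partite : List (String × String × Int × Int)), Dom_partita_con_piu_gol tupla_partite → Spec_partita_con_piu_gol tupla_partite (partita_con_piu_gol tupla_partite)

-- ===== LEMMAS AND PROOFS =====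

-- the list of cumulative sums starting from s
def pvPrefFrom (s : Int) : List (String × String × Int × Int) → List Int
  | [] => []
  | t :: ts => (s + (t.2.2.1 + t.2.2.2)) :: pvPrefFrom (s + (t.2.2.1 + t.2.2.2)) ts

-- the record-collecting fold carrying the record explicitly
def pvRecFold (pref : List Int) (m : Int) (ris : List Int) : Int × List Int :=
  pref.foldl (fun st p => if p > st.1 then (p, st.2 ++ [p]) else st) (m, ris)

lemma pvPrefB_fold : ∀ (l : List (String × String × Int × Int)) (s : Int) (acc : List Int),
    (l.foldl (fun (st : Int × List Int) t =>
      let v := st.1 + (t.2.2.1 + t.2.2.2)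
      (v, st.2 ++ [v])) (s, acc)).2 = acc ++ pvPrefFrom s l := by
  intro l
  induction l with
  | nil => simp [pvPrefFrom]
  | cons t ts ih =>
      intro s acc
      simp only [List.foldl_cons, pvPrefFrom]
      rw [ih]
      simp

lemma pvA_fold : ∀ (l : List (String × String × Int × Int)) (m s : Int) (ris : List Int),
    ∃ s', (l.foldl
      (fun (st : Int × Int × List Int) t =>
        let mx := st.1
        let somma := st.2.1 + t.2.2.1 + t.2.2.2
        if somma > mx then (somma, somma, st.2.2 ++ [somma]) else (mx, somma, st.2.2))
      (m, s, ris))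
      = ((pvRecFold (pvPrefFrom s l) m ris).1, s', (pvRecFold (pvPrefFrom s l) m ris).2) := by
  intro l
  induction l with
  | nil => intro m s ris; exact ⟨s, rfl⟩
  | cons t ts ih =>
      intro m s ris
      simp only [List.foldl_cons, pvPrefFrom, pvRecFold, ← add_assoc]
      by_cases h : s + t.2.2.1 + t.2.2.2 > m
      · simpa [h] using ih (s + t.2.2.1 + t.2.2.2) (s + t.2.2.1 + t.2.2.2) (ris ++ [s + t.2.2.1 + t.2.2.2])
      · simpa [h] using ih m (s + t.2.2.1 + t.2.2.2) ris

lemma pvB_fold : ∀ (pref : List Int) (m : Int) (ris : List Int), ris.getLast?.getD 0 = m →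
    (pref.foldl (fun (ris : List Int) p => if p > (ris.getLast?.getD 0) then ris ++ [p] else ris) ris
        = (pvRecFold pref m ris).2)
    ∧ (pvRecFold pref m ris).2.getLast?.getD 0 = (pvRecFold pref m ris).1 := by
  intro pref
  induction pref with
  | nil => intro m ris h; exact ⟨rfl, h⟩
  | cons p ps ih =>
      intro m ris h
      simp only [List.foldl_cons, pvRecFold, h]
      by_cases hp : p > m
      · have hlast : (ris ++ [p]).getLast?.getD 0 = p := by simp
        simpa [hp] using ih p (ris ++ [p]) hlast
      · simpa [hp] using ih m ris h

-- ===== VERDICT (by name: the statement is the Claim_ definition above) =====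
theorem partita_con_piu_gol_spec : Claim_equal_partita_con_piu_gol := by
  intro l _
  unfold Spec_partita_con_piu_gol partita_con_piu_gol partita_con_piu_gol_alt pvPrefB
  obtain ⟨s', hA⟩ := pvA_fold l 0 0 []
  rw [pvPrefB_fold l 0 []]
  obtain ⟨h1, h2⟩ := pvB_fold (pvPrefFrom 0 l) 0 [] (by simp)
  simp only [List.nil_append] at *
  rw [hA, h1, h2]
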